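-- pv_equiv track=rewrite | github.com/srajsonu/CodeChef | April Long Challenge 2021/3. Strong Language.py | solve
-- ===== SOURCE A (Python) =====
-- def solve(A, n, k):
--     cnt = 0
--     ans = 0
--     for i in range(n):
--         if A[i] == '*':
--             cnt += 1
--         else:
--             ans = max(ans, cnt)
--             cnt = 0
--         ans = max(ans, cnt)
--
--     if ans >= k:
--         return 'YES'
--     else:
--         return 'NO'
-- ===== SOURCE B (Python) =====
-- def solve(A, n, k):
--     # Mask the first n items ('*' vs anything else) into a string, then one
--     # substring test: a run of k stars exists iff '*'*k occurs in the mask.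
--     # max(n, 0) mirrors range(n), which is empty for negative n; a run longer
--     # than the mask itself is impossible, so test k <= len(s) first.
--     s = ''.join('*' if x == '*' else '.' for x in A[:max(n, 0)])
--     return 'YES' if k <= len(s) and '*' * k in s else 'NO'
-- ===== Notes on version B (the rewrite author's own statement) =====
-- stated objective: idiomatic
-- what changed: Replaced the interleaved running-counter/max-update loop with building a '*'/'.' mask string of the first n items and a single substring containment test '*'*k in s.
import Mathlib
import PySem

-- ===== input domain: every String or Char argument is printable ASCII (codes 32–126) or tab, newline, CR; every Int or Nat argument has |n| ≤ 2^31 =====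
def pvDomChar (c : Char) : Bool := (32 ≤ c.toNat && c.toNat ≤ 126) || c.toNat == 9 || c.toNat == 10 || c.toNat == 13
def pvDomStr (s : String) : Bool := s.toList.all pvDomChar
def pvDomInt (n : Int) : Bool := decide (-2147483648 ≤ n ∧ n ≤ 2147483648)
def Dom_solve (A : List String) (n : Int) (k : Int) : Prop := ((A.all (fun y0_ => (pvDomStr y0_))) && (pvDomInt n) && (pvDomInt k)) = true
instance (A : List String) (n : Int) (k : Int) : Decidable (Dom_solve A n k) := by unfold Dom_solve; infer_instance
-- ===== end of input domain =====

-- B replaces A's running-counter/max loop by one substring test on a '*'/'.' mask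
-- of the first n items (idiomatic; same return value everywhere A returns).

-- ===== PORT A =====
-- one iteration of A's loop on the state (cnt, ans), for the element A[i]
def pvStep (s : Int × Int) (x : String) : Int × Int :=
  let s1 := if x = "*" then (s.1 + 1, s.2) else ((0 : Int), max s.2 s.1)
  (s1.1, max s1.2 s1.1)

-- exact per-iteration state (cnt, ans) of A's loop, indices via pyGetD (in range under Pre_)
def solve (A : List String) (n : Int) (k : Int) : String :=
  let st := (PySem.List.pyRange 0 n 1).foldl
    (fun s i => pvStep s (PySem.List.pyGetD A i "")) ((0 : Int), (0 : Int))
  if st.2 ≥ k then "YES" else "NO"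

-- ===== PORT B =====
def solve_alt (A : List String) (n : Int) (k : Int) : String :=
  let s : List Char :=
    PySem.Chars.join [] ((PySem.List.slice A none (some (max n 0))).map
      (fun x => if x = "*" then ['*'] else ['.']))
  if decide (k ≤ (s.length : Int)) && PySem.Chars.isIn (List.replicate k.toNat '*') s then "YES" else "NO"

-- ===== PRECONDITION & SPEC =====
-- A raises IndexError as soon as i reaches len(A) when n > len(A); that is the only failure.
def Pre_solve (A : List String) (n : Int) (k : Int) : Prop := n ≤ (A.length : Int)
instance (A : List String) (n : Int) (k : Int) : Decidable (Pre_solve A n k) := by unfold Pre_solve; infer_instance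
def pvWitness_solve : List String × Int × Int := (["*", "a", "*"], 3, 1)

def Spec_solve (A : List String) (n : Int) (k : Int) (out : String) : Prop := out = solve_alt A n k
instance (A : List String) (n : Int) (k : Int) (out : String) : Decidable (Spec_solve A n k out) := by unfold Spec_solve; infer_instance

-- ===== CLAIM (what is proved, stated in full; the proofs are below) =====
def Claim_equal_solve : Prop := ∀ (A : List String) (n : Int) (k : Int), Dom_solve A n k → Pre_solve A n k → Spec_solve A n k (solve A n k)

-- ===== LEMMAS AND PROOFS =====

-- the "best run ending here vs best run later" functional: R c l = longest '*'-run of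
-- (c stars followed by l), counting only runs that are whole runs of that word
def pvR (c : Int) : List String → Int
  | [] => c
  | x :: xs => if x = "*" then pvR (c + 1) xs else max c (pvR 0 xs)

-- the mask character B writes for one item
def pvF (x : String) : Char := if x = "*" then '*' else '.'

theorem pvR_ge (l : List String) : ∀ c : Int, c ≤ pvR c l := by
  induction l with
  | nil => intro c; simp [pvR]
  | cons x xs ih =>
    intro c
    by_cases h : x = "*"
    · simpa [pvR, h] using le_trans (by omega) (ih (c + 1))
    · simp [pvR, h]

theorem pvR_mono (l : List String) : ∀ c c' : Int, c ≤ c' → pvR c l ≤ pvR c' l := by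
  induction l with
  | nil => intro c c' h; simpa [pvR] using h
  | cons x xs ih =>
    intro c c' h
    by_cases hx : x = "*"
    · simpa [pvR, hx] using ih (c + 1) (c' + 1) (by omega)
    · simp [pvR, hx]; omega

-- a replicate-of-stars prefix block is an infix of any word it heads
theorem pvRepInfix {m c : Nat} (hm : m ≤ c) (t : List Char) :
    List.replicate m '*' <:+: List.replicate c '*' ++ t := by
  have hpre : List.replicate m '*' <+: List.replicate c '*' := by
    refine ⟨List.replicate (c - m) '*', ?_⟩
    rw [← List.replicate_add]; congr 1; omega
  exact (hpre.trans (List.prefix_append _ _)).isInfix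

-- A's loop computes max a (pvR c l) as its ans component
theorem pvFold_eq (l : List String) : ∀ c a : Int, 0 ≤ a → c ≤ a →
    (l.foldl pvStep (c, a)).2 = max a (pvR c l) := by
  induction l with
  | nil => intro c a _ hca; simp [pvR]; omega
  | cons x xs ih =>
    intro c a ha hca
    by_cases hx : x = "*"
    · have hstep : pvStep (c, a) x = (c + 1, max a (c + 1)) := by
        simp [pvStep, hx]
      have h1 := ih (c + 1) (max a (c + 1)) (by omega) (by omega)
      have h2 : c + 1 ≤ pvR (c + 1) xs := pvR_ge xs (c + 1)
      rw [List.foldl_cons, hstep, h1]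
      simp only [pvR, if_pos hx]
      omega
    · have hstep : pvStep (c, a) x = (0, max a c) := by
        simp [pvStep, hx]; omega
      have h1 := ih 0 (max a c) (by omega) (by omega)
      rw [List.foldl_cons, hstep, h1]
      simp only [pvR, if_neg hx]
      omega

-- a prefix of stars forces a long run
theorem pvPrefix_le (m : Nat) : ∀ (l : List String) (c : Int),
    List.replicate m '*' <+: l.map pvF → c + m ≤ pvR c l := by
  induction m with
  | zero => intro l c _; simpa using pvR_ge l c
  | succ m ih =>
    intro l c hp
    cases l with
    | nil => simp [List.replicate_succ] at hp
    | cons x xs =>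
      rw [List.replicate_succ, List.map_cons] at hp
      rcases List.cons_prefix_cons.mp hp with ⟨hx, hp'⟩
      have hxs : x = "*" := by
        by_contra h
        simp [pvF, h] at hx
      have := ih xs (c + 1) hp'
      simp [pvR, hxs]
      omega

theorem pvInfix_le (l : List String) : ∀ m : Nat,
    List.replicate m '*' <:+: l.map pvF → (m : Int) ≤ pvR 0 l := by
  induction l with
  | nil => intro m h; simp at h; simp [h, pvR]
  | cons x xs ih =>
    intro m h
    rw [List.map_cons, List.infix_cons_iff] at h
    rcases h with h | h
    · simpa using pvPrefix_le m (x :: xs) 0 (by simpa using h)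
    · have h1 := ih m h
      have h2 : pvR 0 xs ≤ pvR 0 (x :: xs) := by
        by_cases hx : x = "*"
        · simpa [pvR, hx] using pvR_mono xs 0 1 (by omega)
        · simp [pvR, hx]
      omega

theorem pvLe_infix (l : List String) : ∀ (c m : Nat), (m : Int) ≤ pvR (c : Int) l →
    List.replicate m '*' <:+: (List.replicate c '*' ++ l.map pvF) := by
  induction l with
  | nil =>
    intro c m h
    simp only [pvR] at h
    have hm : m ≤ c := by exact_mod_cast h
    simpa using pvRepInfix hm []
  | cons x xs ih =>
    intro c m h
    by_cases hx : x = "*"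
    · simp only [pvR, if_pos hx] at h
      have h' : (m : Int) ≤ pvR ((c + 1 : Nat) : Int) xs := by push_cast; simpa using h
      have := ih (c + 1) m h'
      simpa [List.replicate_succ', List.map_cons, pvF, hx] using this
    · simp only [pvR, if_neg hx] at h
      rcases le_max_iff.mp h with h1 | h2
      · have hm : m ≤ c := by exact_mod_cast h1
        exact pvRepInfix hm _
      · have := ih 0 m (by simpa using h2)
        simp only [List.replicate_zero, List.nil_append] at this
        exact this.trans (((List.suffix_cons (pvF x) (xs.map pvF)).trans
          (List.suffix_append _ _)).isInfix)

-- a run is never longer than the word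
theorem pvR_le (l : List String) : ∀ c : Int, 0 ≤ c → pvR c l ≤ c + l.length := by
  induction l with
  | nil => intro c _; simp [pvR]
  | cons x xs ih =>
    intro c hc
    by_cases hx : x = "*"
    · have := ih (c + 1) (by omega)
      simp only [pvR, if_pos hx, List.length_cons]
      push_cast
      omega
    · have := ih 0 (by omega)
      simp only [pvR, if_neg hx, List.length_cons]
      push_cast
      omega

-- the two decisions agree
theorem pvDecide (l : List String) (k : Int) :
    (k ≤ max 0 (pvR 0 l)) ↔ (k ≤ (l.length : Int) ∧ List.replicate k.toNat '*' <:+: l.map pvF) := by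
  have hR : (0 : Int) ≤ pvR 0 l := pvR_ge l 0
  have hle : pvR 0 l ≤ (l.length : Int) := by simpa using pvR_le l 0 le_rfl
  constructor
  · intro h
    refine ⟨by omega, ?_⟩
    have : (k.toNat : Int) ≤ pvR 0 l := by omega
    simpa using pvLe_infix l 0 k.toNat this
  · intro h
    have := pvInfix_le l k.toNat h.2
    omega

-- ===== VERDICT (by name: the statement is the Claim_ definition above) =====
theorem solve_spec : Claim_equal_solve := by
  intro A n k _ hpre
  unfold Spec_solve solve solve_alt
  have hn0 : (0 : Int) ≤ max n 0 := le_max_right n 0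
  set l : List String := A.take (max n 0).toNat with hl
  -- B side: the slice is l and join of singletons is the map
  have hslice : PySem.List.slice A none (some (max n 0)) = l := PySem.List.slice_to A hn0
  have hjoin : PySem.Chars.join [] ((PySem.List.slice A none (some (max n 0))).map
      (fun x => if x = "*" then ['*'] else ['.'])) = l.map pvF := by
    rw [hslice]
    have : (l.map (fun x => if x = "*" then ['*'] else ['.'])) = (l.map pvF).map ([·]) := by
      simp only [List.map_map]
      exact List.map_congr_left (fun a _ => by by_cases h : a = "*" <;> simp [pvF, h])
    rw [this, PySem.Chars.join_nil_singletons]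
  -- A side: the index fold is the fold over l
  have hlen : ((l.length : Nat) : Int) = max n 0 := by
    have h1 : (max n 0).toNat ≤ A.length := by
      have : max n 0 ≤ (A.length : Int) := by unfold Pre_solve at hpre; omega
      omega
    simp [hl, List.length_take, Nat.min_eq_left h1]
  have hrange : PySem.List.pyRange 0 n 1 = PySem.List.pyRange 0 (max n 0) 1 := by
    by_cases h : 0 ≤ n
    · rw [max_eq_left h]
    · rw [PySem.List.pyRange_one_eq_nil (by omega), PySem.List.pyRange_one_eq_nil (by omega)]

  have hget : ∀ i ∈ PySem.List.pyRange 0 (max n 0) 1,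
      PySem.List.pyGetD A i "" = PySem.List.pyGetD l i "" := by
    intro i hi
    rcases (PySem.List.mem_pyRange_one).mp hi with ⟨h0, h1⟩
    rw [PySem.List.pyGetD_eq_getElem A "" h0 (by unfold Pre_solve at hpre; omega),
        PySem.List.pyGetD_eq_getElem l "" h0 (by omega)]
    simp [hl, List.getElem_take]
  have hfold : (PySem.List.pyRange 0 n 1).foldl
      (fun s i => pvStep s (PySem.List.pyGetD A i "")) ((0 : Int), (0 : Int))
      = l.foldl pvStep ((0 : Int), (0 : Int)) := by
    rw [hrange]
    have hc : (PySem.List.pyRange 0 (max n 0) 1).foldl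
        (fun s i => pvStep s (PySem.List.pyGetD A i "")) ((0 : Int), (0 : Int))
        = (PySem.List.pyRange 0 (max n 0) 1).foldl
        (fun s i => pvStep s (PySem.List.pyGetD l i "")) ((0 : Int), (0 : Int)) :=
      PySem.List.foldl_congr_mem _ _ _ _ (fun s i hi => by rw [hget i hi])
    rw [hc, ← hlen]
    exact PySem.List.foldl_pyRange_zero_pyGetD' l "" pvStep ((0 : Int), (0 : Int))
  rw [hfold, hjoin]
  have hans := pvFold_eq l 0 0 (by omega) (by omega)
  simp only [hans]
  rcases pvDecide l k with ⟨h1, h2⟩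
  have hlen2 : (l.map pvF).length = l.length := by simp
  by_cases hk : k ≤ max 0 (pvR 0 l)
  · rcases h1 hk with ⟨ha, hb⟩
    rw [if_pos hk, if_pos (by
      rw [hlen2]
      simp only [Bool.and_eq_true, decide_eq_true_eq, PySem.Chars.isIn_iff_infix]
      exact ⟨ha, hb⟩)]
  · rw [if_neg hk, if_neg (by
      intro hc
      rw [hlen2] at hc
      simp only [Bool.and_eq_true, decide_eq_true_eq, PySem.Chars.isIn_iff_infix] at hc
      exact hk (h2 hc))]
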